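-- pv_equiv track=rewrite | github.com/schmitzl/AI_project | Source/realCode/testSongLyrics.py | getMoodCluster
-- ===== SOURCE A (Python) =====
-- def getMoodCluster(subMood):
--
--     cluster1 = ["passionate", "rousing", "confident", "boisterous", "rowdy"]
--     cluster2 = ["rollicking", "cheerful", "fun", "sweet", "amiable-good-natured"]
--     cluster3 = ["literate", "poignant", "wistful", "bittersweet", "autumnal", "brooding"]
--     cluster4 = ["humorous", "silly", "campy", "quirky", "whimsical", "witty", "wry"]
--     cluster5 = ["aggressive", "fiery", "tense-anxious", "intense", "volatile", "visceral"]
--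
--     subMoods = subMood.split(',')
--
--     clusterCount = [0,0,0,0,0]
--
--     for mood in subMoods:
--         if mood in cluster1:
--             clusterCount[0]+=1
--         elif mood in cluster2:
--             clusterCount[1]+=1
--         elif mood in cluster3:
--             clusterCount[2]+=1
--         elif mood in cluster4:
--             clusterCount[3]+=1
--         elif mood in cluster5:
--             clusterCount[4]+=1
--
--     if sum(clusterCount) is 0:
--         return None
--
--     index = 0
--
--     for i in range (0,5):
--         if clusterCount[i] > clusterCount[index]:
--             index = i
--
--     return 'c' + str(index + 1)
-- ===== SOURCE B (Python) =====
-- def getMoodCluster(subMood):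
--     clusters = [
--         ["passionate", "rousing", "confident", "boisterous", "rowdy"],
--         ["rollicking", "cheerful", "fun", "sweet", "amiable-good-natured"],
--         ["literate", "poignant", "wistful", "bittersweet", "autumnal", "brooding"],
--         ["humorous", "silly", "campy", "quirky", "whimsical", "witty", "wry"],
--         ["aggressive", "fiery", "tense-anxious", "intense", "volatile", "visceral"],
--     ]
--     subMoods = subMood.split(',')
--     counts = [sum(1 for m in subMoods if m in cl) for cl in clusters]
--     if not any(counts):
--         return None
--     return 'c' + str(counts.index(max(counts)) + 1)
-- ===== Notes on version B (the rewrite author's own statement) =====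
-- stated objective: simpler
-- what changed: Replaces A's single priority-elif pass with a mutable 5-slot counter array and an explicit index-scan argmax loop by independent per-cluster membership counts (one comprehension) followed by counts.index(max(counts)); correct because the clusters are pairwise disjoint.
import Mathlib
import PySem

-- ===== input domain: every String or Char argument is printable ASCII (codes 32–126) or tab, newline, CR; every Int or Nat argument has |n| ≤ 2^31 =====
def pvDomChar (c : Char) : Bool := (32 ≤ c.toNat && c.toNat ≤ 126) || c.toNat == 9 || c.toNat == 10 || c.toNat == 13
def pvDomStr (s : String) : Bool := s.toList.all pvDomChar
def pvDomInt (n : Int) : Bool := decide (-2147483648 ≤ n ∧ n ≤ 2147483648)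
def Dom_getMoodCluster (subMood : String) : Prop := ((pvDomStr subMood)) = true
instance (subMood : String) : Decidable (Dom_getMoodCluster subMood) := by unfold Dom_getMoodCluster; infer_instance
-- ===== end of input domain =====

-- B replaces A's priority-elif counting pass and index-scan argmax loop by independent
-- per-cluster membership counts plus counts.index(max(counts)) (objective: simpler).

-- ===== PORT A =====
def getMoodCluster (subMood : String) : Option String :=
  let cluster1 : List String := ["passionate", "rousing", "confident", "boisterous", "rowdy"]
  let cluster2 : List String := ["rollicking", "cheerful", "fun", "sweet", "amiable-good-natured"]
  let cluster3 : List String := ["literate", "poignant", "wistful", "bittersweet", "autumnal", "brooding"]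
  let cluster4 : List String := ["humorous", "silly", "campy", "quirky", "whimsical", "witty", "wry"]
  let cluster5 : List String := ["aggressive", "fiery", "tense-anxious", "intense", "volatile", "visceral"]
  let subMoods := (PySem.Str.split? subMood ",").getD []
  let clusterCount : List Int := [0, 0, 0, 0, 0]
  let clusterCount := subMoods.foldl (fun (cc : List Int) mood =>
    if cluster1.contains mood then cc.set 0 (PySem.List.pyGetD cc 0 0 + 1)
    else if cluster2.contains mood then cc.set 1 (PySem.List.pyGetD cc 1 0 + 1)
    else if cluster3.contains mood then cc.set 2 (PySem.List.pyGetD cc 2 0 + 1)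
    else if cluster4.contains mood then cc.set 3 (PySem.List.pyGetD cc 3 0 + 1)
    else if cluster5.contains mood then cc.set 4 (PySem.List.pyGetD cc 4 0 + 1)
    else cc) clusterCount
  if clusterCount.sum = 0 then none
  else
    let index : Int := (PySem.List.pyRange 0 5 1).foldl (fun index i =>
      if PySem.List.pyGetD clusterCount i 0 > PySem.List.pyGetD clusterCount index 0 then i
      else index) 0
    some ("c" ++ PySem.Int.toStr (index + 1))

-- ===== PORT B =====
def getMoodCluster_alt (subMood : String) : Option String :=
  let clusters : List (List String) :=
    [["passionate", "rousing", "confident", "boisterous", "rowdy"],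
     ["rollicking", "cheerful", "fun", "sweet", "amiable-good-natured"],
     ["literate", "poignant", "wistful", "bittersweet", "autumnal", "brooding"],
     ["humorous", "silly", "campy", "quirky", "whimsical", "witty", "wry"],
     ["aggressive", "fiery", "tense-anxious", "intense", "volatile", "visceral"]]
  let subMoods := (PySem.Str.split? subMood ",").getD []
  let counts : List Int := clusters.map (fun cl => ((subMoods.filter (fun m => cl.contains m)).length : Int))
  if counts.all (fun c => c == 0) then none
  else
    match PySem.List.max? counts (fun x => x) with
    | none => none
    | some mx =>
      match PySem.List.index? counts mx with
      | none => none
      | some i => some ("c" ++ PySem.Int.toStr ((i : Int) + 1))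

-- ===== PRECONDITION & SPEC =====
def Spec_getMoodCluster (subMood : String) (out : Option String) : Prop := out = getMoodCluster_alt subMood
instance (subMood : String) (out : Option String) : Decidable (Spec_getMoodCluster subMood out) := by unfold Spec_getMoodCluster; infer_instance

-- ===== CLAIM (what is proved, stated in full; the proofs are below) =====
def Claim_equal_getMoodCluster : Prop := ∀ (subMood : String), Dom_getMoodCluster subMood → Spec_getMoodCluster subMood (getMoodCluster subMood)

-- ===== LEMMAS AND PROOFS =====

def C1 : List String := ["passionate", "rousing", "confident", "boisterous", "rowdy"]
def C2 : List String := ["rollicking", "cheerful", "fun", "sweet", "amiable-good-natured"]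
def C3 : List String := ["literate", "poignant", "wistful", "bittersweet", "autumnal", "brooding"]
def C4 : List String := ["humorous", "silly", "campy", "quirky", "whimsical", "witty", "wry"]
def C5 : List String := ["aggressive", "fiery", "tense-anxious", "intense", "volatile", "visceral"]

def cnt (cl ms : List String) : Int := ((ms.filter (fun m => cl.contains m)).length : Int)

lemma cnt_nil (cl : List String) : cnt cl [] = 0 := rfl

lemma cnt_pos {cl : List String} {m : String} (h : m ∈ cl) (t : List String) :
    cnt cl (m :: t) = cnt cl t + 1 := by
  simp [cnt, h]

lemma cnt_neg {cl : List String} {m : String} (h : m ∉ cl) (t : List String) :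
    cnt cl (m :: t) = cnt cl t := by
  simp [cnt, h]

lemma d12 {m : String} (h : m ∈ C1) : m ∉ C2 := by
  simp [C1] at h; rcases h with rfl|rfl|rfl|rfl|rfl <;> decide
lemma d13 {m : String} (h : m ∈ C1) : m ∉ C3 := by
  simp [C1] at h; rcases h with rfl|rfl|rfl|rfl|rfl <;> decide
lemma d14 {m : String} (h : m ∈ C1) : m ∉ C4 := by
  simp [C1] at h; rcases h with rfl|rfl|rfl|rfl|rfl <;> decide
lemma d15 {m : String} (h : m ∈ C1) : m ∉ C5 := by
  simp [C1] at h; rcases h with rfl|rfl|rfl|rfl|rfl <;> decide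
lemma d23 {m : String} (h : m ∈ C2) : m ∉ C3 := by
  simp [C2] at h; rcases h with rfl|rfl|rfl|rfl|rfl <;> decide
lemma d24 {m : String} (h : m ∈ C2) : m ∉ C4 := by
  simp [C2] at h; rcases h with rfl|rfl|rfl|rfl|rfl <;> decide
lemma d25 {m : String} (h : m ∈ C2) : m ∉ C5 := by
  simp [C2] at h; rcases h with rfl|rfl|rfl|rfl|rfl <;> decide
lemma d34 {m : String} (h : m ∈ C3) : m ∉ C4 := by
  simp [C3] at h; rcases h with rfl|rfl|rfl|rfl|rfl|rfl <;> decide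
lemma d35 {m : String} (h : m ∈ C3) : m ∉ C5 := by
  simp [C3] at h; rcases h with rfl|rfl|rfl|rfl|rfl|rfl <;> decide
lemma d45 {m : String} (h : m ∈ C4) : m ∉ C5 := by
  simp [C4] at h; rcases h with rfl|rfl|rfl|rfl|rfl|rfl|rfl <;> decide

lemma stepEq (m : String) (a b c d e : Int) :
    (if C1.contains m then ([a, b, c, d, e] : List Int).set 0 (PySem.List.pyGetD [a, b, c, d, e] 0 0 + 1)
      else if C2.contains m then ([a, b, c, d, e] : List Int).set 1 (PySem.List.pyGetD [a, b, c, d, e] 1 0 + 1)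
      else if C3.contains m then ([a, b, c, d, e] : List Int).set 2 (PySem.List.pyGetD [a, b, c, d, e] 2 0 + 1)
      else if C4.contains m then ([a, b, c, d, e] : List Int).set 3 (PySem.List.pyGetD [a, b, c, d, e] 3 0 + 1)
      else if C5.contains m then ([a, b, c, d, e] : List Int).set 4 (PySem.List.pyGetD [a, b, c, d, e] 4 0 + 1)
      else [a, b, c, d, e])
    = if m ∈ C1 then [a + 1, b, c, d, e]
      else if m ∈ C2 then [a, b + 1, c, d, e]
      else if m ∈ C3 then [a, b, c + 1, d, e]
      else if m ∈ C4 then [a, b, c, d + 1, e]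
      else if m ∈ C5 then [a, b, c, d, e + 1]
      else [a, b, c, d, e] := by
  norm_num [PySem.List.pyGetD, PySem.List.pyGet?, PySem.List.pyIdx?, Int.toNat, List.getElem_cons_succ, List.getElem_cons_zero]

lemma foldA (ms : List String) (a b c d e : Int) :
    ms.foldl (fun (cc : List Int) mood =>
      if C1.contains mood then cc.set 0 (PySem.List.pyGetD cc 0 0 + 1)
      else if C2.contains mood then cc.set 1 (PySem.List.pyGetD cc 1 0 + 1)
      else if C3.contains mood then cc.set 2 (PySem.List.pyGetD cc 2 0 + 1)
      else if C4.contains mood then cc.set 3 (PySem.List.pyGetD cc 3 0 + 1)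
      else if C5.contains mood then cc.set 4 (PySem.List.pyGetD cc 4 0 + 1)
      else cc) [a, b, c, d, e]
    = [a + cnt C1 ms, b + cnt C2 ms, c + cnt C3 ms, d + cnt C4 ms, e + cnt C5 ms] := by
  induction ms generalizing a b c d e with
  | nil => simp [cnt_nil]
  | cons m t ih =>
    simp only [List.foldl_cons]
    rw [stepEq]
    by_cases h1 : m ∈ C1
    · rw [if_pos h1, ih, cnt_pos h1, cnt_neg (d12 h1), cnt_neg (d13 h1), cnt_neg (d14 h1),
        cnt_neg (d15 h1)]
      ring_nf
    rw [if_neg h1]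
    by_cases h2 : m ∈ C2
    · rw [if_pos h2, ih, cnt_neg h1, cnt_pos h2, cnt_neg (d23 h2), cnt_neg (d24 h2),
        cnt_neg (d25 h2)]
      ring_nf
    rw [if_neg h2]
    by_cases h3 : m ∈ C3
    · rw [if_pos h3, ih, cnt_neg h1, cnt_neg h2, cnt_pos h3, cnt_neg (d34 h3), cnt_neg (d35 h3)]
      ring_nf
    rw [if_neg h3]
    by_cases h4 : m ∈ C4
    · rw [if_pos h4, ih, cnt_neg h1, cnt_neg h2, cnt_neg h3, cnt_pos h4, cnt_neg (d45 h4)]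
      ring_nf
    rw [if_neg h4]
    by_cases h5 : m ∈ C5
    · rw [if_pos h5, ih, cnt_neg h1, cnt_neg h2, cnt_neg h3, cnt_neg h4, cnt_pos h5]
      ring_nf
    rw [if_neg h5, ih, cnt_neg h1, cnt_neg h2, cnt_neg h3, cnt_neg h4, cnt_neg h5]

lemma idx5 (n1 n2 n3 n4 n5 v : Int) :
    PySem.List.index? [n1, n2, n3, n4, n5] v
    = if n1 = v then some 0 else if n2 = v then some 1 else if n3 = v then some 2
      else if n4 = v then some 3 else if n5 = v then some 4 else none := by
  simp [List.idxOf?, List.findIdx?_cons]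
  split_ifs <;> simp_all

set_option maxHeartbeats 2000000 in
lemma tail5 (n1 n2 n3 n4 n5 : Int) (h1 : 0 ≤ n1) (h2 : 0 ≤ n2) (h3 : 0 ≤ n3)
    (h4 : 0 ≤ n4) (h5 : 0 ≤ n5) :
    (if ([n1, n2, n3, n4, n5] : List Int).sum = 0 then (none : Option String)
     else some ("c" ++ PySem.Int.toStr (((PySem.List.pyRange 0 5 1).foldl (fun index i =>
       if PySem.List.pyGetD [n1, n2, n3, n4, n5] i 0 > PySem.List.pyGetD [n1, n2, n3, n4, n5] index 0
       then i else index) 0) + 1)))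
    = (if ([n1, n2, n3, n4, n5] : List Int).all (fun c => c == 0) then none
       else match PySem.List.max? [n1, n2, n3, n4, n5] (fun x => x) with
         | none => none
         | some mx => match PySem.List.index? [n1, n2, n3, n4, n5] mx with
           | none => none
           | some i => some ("c" ++ PySem.Int.toStr ((i : Int) + 1))) := by
  have hr : PySem.List.pyRange 0 5 1 = [0, 1, 2, 3, 4] := by decide
  rw [hr, PySem.List.max?_id_cons]
  simp only [List.foldl_cons, List.foldl_nil]
  rw [idx5]
  by_cases hz : n1 + n2 + n3 + n4 + n5 = 0
  · have e1 : n1 = 0 := by omega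
    have e2 : n2 = 0 := by omega
    have e3 : n3 = 0 := by omega
    have e4 : n4 = 0 := by omega
    have e5 : n5 = 0 := by omega
    subst e1 e2 e3 e4 e5
    decide
  · rw [if_neg (show ¬([n1, n2, n3, n4, n5] : List Int).sum = 0 from by simp; omega),
      if_neg (show ¬(([n1, n2, n3, n4, n5] : List Int).all (fun c => c == 0) = true) from by
        simp; omega)]
    have g0 : PySem.List.pyGetD [n1, n2, n3, n4, n5] 0 0 = n1 := by
      simp [PySem.List.pyGetD, PySem.List.pyGet?, PySem.List.pyIdx?]
    have g1 : PySem.List.pyGetD [n1, n2, n3, n4, n5] 1 0 = n2 := by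
      simp [PySem.List.pyGetD, PySem.List.pyGet?, PySem.List.pyIdx?]
    have g2 : PySem.List.pyGetD [n1, n2, n3, n4, n5] 2 0 = n3 := by
      simp [PySem.List.pyGetD, PySem.List.pyGet?, PySem.List.pyIdx?]
    have g3 : PySem.List.pyGetD [n1, n2, n3, n4, n5] 3 0 = n4 := by
      simp [PySem.List.pyGetD, PySem.List.pyGet?, PySem.List.pyIdx?]
    have g4 : PySem.List.pyGetD [n1, n2, n3, n4, n5] 4 0 = n5 := by
      simp [PySem.List.pyGetD, PySem.List.pyGet?, PySem.List.pyIdx?]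
    simp only [gt_iff_lt, apply_ite (fun j => PySem.List.pyGetD [n1, n2, n3, n4, n5] j 0),
      g0, g1, g2, g3, g4]
    split_ifs <;> first | rfl | (exfalso; omega)


-- ===== VERDICT (by name: the statement is the Claim_ definition above) =====
theorem getMoodCluster_spec : Claim_equal_getMoodCluster := by
  intro subMood _
  simp only [Spec_getMoodCluster, getMoodCluster, getMoodCluster_alt]
  rw [show (["passionate", "rousing", "confident", "boisterous", "rowdy"] : List String) = C1 from rfl,
    show (["rollicking", "cheerful", "fun", "sweet", "amiable-good-natured"] : List String) = C2 from rfl,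
    show (["literate", "poignant", "wistful", "bittersweet", "autumnal", "brooding"] : List String) = C3 from rfl,
    show (["humorous", "silly", "campy", "quirky", "whimsical", "witty", "wry"] : List String) = C4 from rfl,
    show (["aggressive", "fiery", "tense-anxious", "intense", "volatile", "visceral"] : List String) = C5 from rfl]
  rw [foldA]
  simp only [zero_add, List.map_cons, List.map_nil]
  rw [show ∀ cl ms, ((List.filter (fun m => cl.contains m) ms).length : Int) = cnt cl ms
    from fun _ _ => rfl]
  exact tail5 _ _ _ _ _ (Int.natCast_nonneg _) (Int.natCast_nonneg _) (Int.natCast_nonneg _)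
    (Int.natCast_nonneg _) (Int.natCast_nonneg _)
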